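-- pv_equiv track=rewrite | github.com/OpenGHz/auto-atomic-operation | examples/view_scene.py | _strip_debug_arg
-- ===== SOURCE A (Python) =====
-- def _strip_debug_arg(argv: list[str]) -> bool:
--     """Consume this script's --debug flag before Hydra parses argv."""
--     debug = False
--     stripped: list[str] = []
--     hydra_separator_seen = False
--     for arg in argv:
--         if arg == "--":
--             hydra_separator_seen = True
--             stripped.append(arg)
--         elif not hydra_separator_seen and arg == "--debug":
--             debug = True
--         else:
--             stripped.append(arg)
--     argv[:] = stripped
--     return debug
-- ===== SOURCE B (Python) =====
-- def _strip_debug_arg(argv: list[str]) -> bool: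
--     """Consume this script's --debug flag before Hydra parses argv."""
--     try:
--         sep = argv.index("--")
--     except ValueError:
--         sep = len(argv)
--     before, after = argv[:sep], argv[sep:]
--     debug = "--debug" in before
--     argv[:] = [a for a in before if a != "--debug"] + after
--     return debug
-- ===== Notes on version B (the rewrite author's own statement) =====
-- stated objective: simpler
-- what changed: Replaces the stateful single-pass loop with its hydra_separator_seen flag by locate-then-split: find the first '--' with list.index, split argv there, test membership of '--debug' in the prefix and filter it out with a comprehension.
import Mathlib
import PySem

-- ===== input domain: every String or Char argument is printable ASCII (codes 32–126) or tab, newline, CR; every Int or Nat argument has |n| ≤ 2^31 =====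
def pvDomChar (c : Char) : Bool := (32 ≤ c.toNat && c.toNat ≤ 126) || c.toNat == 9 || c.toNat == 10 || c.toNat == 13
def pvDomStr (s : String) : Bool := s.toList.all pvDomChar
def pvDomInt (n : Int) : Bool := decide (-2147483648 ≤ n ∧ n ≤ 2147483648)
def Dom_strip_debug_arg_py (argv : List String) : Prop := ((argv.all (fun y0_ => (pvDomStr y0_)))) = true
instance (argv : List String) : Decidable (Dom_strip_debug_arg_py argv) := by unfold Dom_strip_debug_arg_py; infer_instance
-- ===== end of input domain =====

-- ===== PORT A =====
-- Both Pythons mutate argv in place; the equivalence proved here is about the RETURN value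
-- (Python B performs the same mutation as A, checked by the differential tester on B itself).
-- A's loop body: state = (debug, stripped, hydra_separator_seen).
def pvStepA (st : Bool × List String × Bool) (arg : String) : Bool × List String × Bool :=
  if arg == "--" then (st.1, st.2.1 ++ [arg], true)
  else if !st.2.2 && arg == "--debug" then (true, st.2.1, st.2.2)
  else (st.1, st.2.1 ++ [arg], st.2.2)

-- A's loop: foldl of pvStepA over argv.
def strip_debug_arg_py (argv : List String) : Bool :=
  (argv.foldl pvStepA (false, [], false)).1

-- ===== PORT B =====
-- B: sep = index of first "--" (len if absent), split, membership test on the prefix.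
def strip_debug_arg_py_alt (argv : List String) : Bool :=
  let sep : Nat := match PySem.List.index? argv "--" with
    | some i => i
    | none => argv.length
  let before := List.take sep argv
  before.contains "--debug"

-- ===== PRECONDITION & SPEC =====
def Spec_strip_debug_arg_py (argv : List String) (out : Bool) : Prop := out = strip_debug_arg_py_alt argv
instance (argv : List String) (out : Bool) : Decidable (Spec_strip_debug_arg_py argv out) := by unfold Spec_strip_debug_arg_py; infer_instance

-- ===== CLAIM (what is proved, stated in full; the proofs are below) =====
def Claim_equal_strip_debug_arg_py : Prop := ∀ (argv : List String), Dom_strip_debug_arg_py argv → Spec_strip_debug_arg_py argv (strip_debug_arg_py argv)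

-- ===== LEMMAS AND PROOFS =====

-- once the separator has been seen, A's loop never changes debug
theorem pv_loop_seen (l : List String) (d : Bool) (s : List String) :
    (l.foldl pvStepA (d, s, true)).1 = d := by
  induction l generalizing s with
  | nil => rfl
  | cons a l ih =>
    rw [List.foldl_cons]
    have hstep : pvStepA (d, s, true) a = (d, (if a == "--" then s ++ [a] else s ++ [a]), true) := by
      by_cases h : a = "--" <;> simp [pvStepA, h]
    rw [hstep]; split <;> exact ih _

-- before the separator, the debug flag accumulates membership of "--debug" in the prefix
theorem pv_loop_unseen (l : List String) (d : Bool) (s : List String) :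
    (l.foldl pvStepA (d, s, false)).1 =
    (d || (List.take (match PySem.List.index? l "--" with
                      | some i => i
                      | none => l.length) l).contains "--debug") := by
  induction l generalizing d s with
  | nil => simp
  | cons a l ih =>
    rw [List.foldl_cons]
    by_cases h : a = "--"
    · subst h
      rw [PySem.List.index?_cons_self]
      have hstep : pvStepA (d, s, false) "--" = (d, s ++ ["--"], true) := by
        simp [pvStepA]
      rw [hstep, pv_loop_seen]
      simp
    · rw [PySem.List.index?_cons_of_ne l h]
      by_cases hd : a = "--debug"
      · subst hd
        have hstep : pvStepA (d, s, false) "--debug" = (true, s, false) := by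
          simp [pvStepA]
        rw [hstep, ih]
        cases hi : PySem.List.index? l "--" <;>
          simp [List.take_succ_cons]
      · have hstep : pvStepA (d, s, false) a = (d, s ++ [a], false) := by
          simp [pvStepA, h, hd]
        rw [hstep, ih]
        cases hi : PySem.List.index? l "--" <;>
          simp [List.take_succ_cons, Ne.symm hd]

-- ===== VERDICT (by name: the statement is the Claim_ definition above) =====
theorem strip_debug_arg_py_spec : Claim_equal_strip_debug_arg_py := by
  intro argv _
  show strip_debug_arg_py argv = strip_debug_arg_py_alt argv
  unfold strip_debug_arg_py strip_debug_arg_py_alt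
  rw [pv_loop_unseen]
  simp
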